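-- pv_equiv track=rewrite | github.com/jsga/Algorithms_and_solutions | Codility/90_tasks_from_indeed_prime_2015_challenge.py | solution
-- ===== SOURCE A (Python) =====
-- def solution(A):
--
--     N = len(A)
--
--     # Special case
--     if N <= 3:
--         return N
--
--     sol = 0
--
--     for i in range(0,N-2):
--         for j in range(i+1,N-1):
--
--             # Now calculate gates crossed
--             # from start to first turn
--             count1 = 0
--             aux_A = A[i] # keep track descending slope
--             for k in range(i,j):
--                 if A[k] > aux_A:
--                     count1 += 1
--                     aux_A = A[k]
--
--             # Try all possible values of the second turn
--             for z in range(j+1,N):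
--
--                 # For each of the values of z, calculate gates in between j and z
--                 count2 = 0
--                 aux_A = A[j]  # keep track descending slope
--                 for k in range(j, z):
--                     if A[k] < aux_A:
--                         count2 += 1
--                         aux_A = A[k]
--
--                 # Also calculate leftover turns
--                 count3 = 0
--                 aux_A = A[z]  # keep track descending slope
--                 for k in range(z,N):
--                     if A[k] > aux_A:
--                         count3 += 1
--                         aux_A = A[k]
--
--                 # Keep track of max after i,j,z have been set
--                 sol = max(sol, count1+count2+count3+3)
--
--     # END
--     return sol
-- ===== SOURCE B (Python) =====
-- def solution(A):
--     N = len(A)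
--     if N <= 3:
--         return N
--
--     # count3[z]: ascending-record gates in A[z:], not counting A[z] itself
--     count3 = []
--     for z in range(N):
--         c = 0
--         aux = A[z]
--         for k in range(z + 1, N):
--             if A[k] > aux:
--                 c += 1
--                 aux = A[k]
--         count3.append(c)
--
--     # best2[j] = max over z in (j, N) of c2(j, z) + count3[z],
--     # where c2(j, z) counts descending records over k in [j, z) starting from A[j]
--     best2 = [0] * N
--     for j in range(1, N - 1):
--         best = count3[j + 1]  # z = j + 1 gives c2 = 0
--         c2 = 0
--         aux = A[j]
--         for z in range(j + 1, N - 1):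
--             if A[z] < aux:
--                 c2 += 1
--                 aux = A[z]
--             cand = c2 + count3[z + 1]
--             if cand > best:
--                 best = cand
--         best2[j] = best
--
--     # best1[j] = max over i in [0, j) of c1(i, j),
--     # where c1(i, j) counts ascending records over k in [i, j) starting from A[i]
--     best1 = [0] * N
--     for i in range(0, N - 2):
--         c1 = 0
--         aux = A[i]
--         for j in range(i + 1, N - 1):
--             if A[j - 1] > aux:
--                 c1 += 1
--                 aux = A[j - 1]
--             if c1 > best1[j]:
--                 best1[j] = c1
--
--     return max(best1[j] + best2[j] + 3 for j in range(1, N - 1))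
-- ===== Notes on version B (the rewrite author's own statement) =====
-- stated objective: faster
-- what changed: Replaces A's brute-force enumeration of all (i,j,z) turn triples with recomputed inner counts (O(N^4)) by an O(N^2) scheme: suffix record counts count3[z] are precomputed, for each j the best z-tail value best2[j]=max_z(count2(j,z)+count3[z]) is computed in one incremental scan, and the main (i,j) scan maintains count1 incrementally and combines it with the precomputed best2[j].
import Mathlib
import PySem

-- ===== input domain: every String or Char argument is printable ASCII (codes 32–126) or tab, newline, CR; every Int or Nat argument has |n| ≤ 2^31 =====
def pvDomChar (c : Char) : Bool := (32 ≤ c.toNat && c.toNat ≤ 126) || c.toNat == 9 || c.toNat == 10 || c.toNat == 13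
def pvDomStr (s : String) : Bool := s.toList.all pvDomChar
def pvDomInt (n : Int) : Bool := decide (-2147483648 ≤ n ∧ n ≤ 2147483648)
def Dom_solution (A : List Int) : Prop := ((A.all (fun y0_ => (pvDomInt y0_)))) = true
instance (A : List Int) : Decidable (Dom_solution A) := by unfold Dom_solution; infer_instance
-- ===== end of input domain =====

-- B replaces A's enumeration of all (i,j,z) turn triples with recomputed inner counts
-- by precomputed suffix record counts, a per-j incremental best tail, and an incremental count1.

-- ===== PORT A =====
-- 'if A[k] > aux: count += 1; aux = A[k]'  (state = (count, aux))
def gateUp (s : Int × Int) (v : Int) : Int × Int := if v > s.2 then (s.1 + 1, v) else s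
-- 'if A[k] < aux: count += 1; aux = A[k]'
def gateDn (s : Int × Int) (v : Int) : Int × Int := if v < s.2 then (s.1 + 1, v) else s

def solution (A : List Int) : Int :=
  let N : Int := (A.length : Int)
  if N ≤ 3 then N
  else
    (PySem.List.pyRange 0 (N - 2)).foldl (fun sol i =>
      (PySem.List.pyRange (i + 1) (N - 1)).foldl (fun sol j =>
        let count1 := ((PySem.List.pyRange i j).foldl
          (fun s k => gateUp s (PySem.List.pyGetD A k 0)) (0, PySem.List.pyGetD A i 0)).1
        (PySem.List.pyRange (j + 1) N).foldl (fun sol z =>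
          let count2 := ((PySem.List.pyRange j z).foldl
            (fun s k => gateDn s (PySem.List.pyGetD A k 0)) (0, PySem.List.pyGetD A j 0)).1
          let count3 := ((PySem.List.pyRange z N).foldl
            (fun s k => gateUp s (PySem.List.pyGetD A k 0)) (0, PySem.List.pyGetD A z 0)).1
          max sol (count1 + count2 + count3 + 3)) sol) sol) 0

-- ===== PORT B =====
-- up(z): ascending-record gates in A[z:], not counting A[z]
def upFrom (A : List Int) (z : Int) : Int :=
  ((PySem.List.pyRange (z + 1) (A.length : Int)).foldl
    (fun s k => gateUp s (PySem.List.pyGetD A k 0)) (0, PySem.List.pyGetD A z 0)).1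

-- bj(j): best over z in (j, N) of c2(j,z) + count3[z]  (state = (best, c2, aux))
def bestTail (A : List Int) (count3 : List Int) (j : Int) : Int :=
  ((PySem.List.pyRange (j + 1) ((A.length : Int) - 1)).foldl
    (fun (s : Int × Int × Int) z =>
      let s2 := gateDn s.2 (PySem.List.pyGetD A z 0)
      let cand := s2.1 + PySem.List.pyGetD count3 (z + 1) 0
      (max s.1 cand, s2))
    (PySem.List.pyGetD count3 (j + 1) 0, 0, PySem.List.pyGetD A j 0)).1

def solution_alt (A : List Int) : Int :=
  let N : Int := (A.length : Int)
  if N ≤ 3 then N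
  else
    let count3 := (PySem.List.pyRange 0 N).map (fun z => upFrom A z)
    let best2 := (PySem.List.pyRange 1 (N - 1)).map (fun j => bestTail A count3 j)
    (PySem.List.pyRange 0 (N - 2)).foldl (fun ans i =>
      ((PySem.List.pyRange (i + 1) (N - 1)).foldl
        (fun (s : Int × Int × Int) j =>
          let s2 := gateUp s.2 (PySem.List.pyGetD A (j - 1) 0)
          let cand := s2.1 + PySem.List.pyGetD best2 (j - 1) 0 + 3
          (max s.1 cand, s2))
        (ans, 0, PySem.List.pyGetD A i 0)).1) 0

-- ===== PRECONDITION & SPEC =====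
def Spec_solution (A : List Int) (out : Int) : Prop := out = solution_alt A
instance (A : List Int) (out : Int) : Decidable (Spec_solution A out) := by unfold Spec_solution; infer_instance

-- ===== CLAIM (what is proved, stated in full; the proofs are below) =====
def Claim_equal_solution : Prop := ∀ (A : List Int), Dom_solution A → Spec_solution A (solution A)

-- ===== LEMMAS AND PROOFS =====

-- proof-side canonical (Nat-indexed) quantities
def gv (A : List Int) (k : Nat) : Int := A.getD k 0
def seg (A : List Int) (a b : Nat) : List Int := (A.drop a).take (b - a)
def cUp (A : List Int) (a b : Nat) : Int := ((seg A a b).foldl gateUp (0, gv A a)).1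
def cDn (A : List Int) (a b : Nat) : Int := ((seg A a b).foldl gateDn (0, gv A a)).1
def c3v (A : List Int) (z : Nat) : Int := cUp A z A.length
def fz (A : List Int) (j z : Nat) : Int := cDn A j z + c3v A z
def M2 (A : List Int) (j : Nat) : Int :=
  (List.range' (j + 2) (A.length - 2 - j)).foldl (fun b z => max b (fz A j z)) (fz A j (j + 1))

lemma pyRange_nil {a b : Int} (h : b ≤ a) : PySem.List.pyRange a b = [] := by
  rw [List.eq_nil_iff_forall_not_mem]
  intro x hx
  rw [PySem.List.mem_pyRange_one] at hx
  omega

lemma pyRange_cast : ∀ (len a : Nat),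
    PySem.List.pyRange (a : Int) ((a : Int) + (len : Int))
      = (List.range' a len).map (fun (k : Nat) => (k : Int))
  | 0, a => by simpa using pyRange_nil (a := (a : Int)) (b := (a : Int) + ((0 : Nat) : Int)) (by omega)
  | (n+1), a => by
    rw [PySem.List.pyRange_one_cons (by push_cast; omega)]
    have h2 : (a : Int) + ((n + 1 : Nat) : Int) = ((a + 1 : Nat) : Int) + (n : Int) := by push_cast; ring
    have h1 : (a : Int) + 1 = ((a + 1 : Nat) : Int) := by push_cast; ring
    rw [h2, h1, pyRange_cast n (a + 1), List.range'_succ]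
    simp

lemma pyRange_cast' (a b : Nat) (h : a ≤ b) :
    PySem.List.pyRange (a : Int) (b : Int)
      = (List.range' a (b - a)).map (fun (k : Nat) => (k : Int)) := by
  have hb : (b : Int) = (a : Int) + ((b - a : Nat) : Int) := by omega
  rw [hb, pyRange_cast]

lemma pyRange_one_cast (b : Nat) (h : 1 ≤ b) :
    PySem.List.pyRange 1 (b : Int)
      = (List.range' 1 (b - 1)).map (fun (k : Nat) => (k : Int)) := by
  have := pyRange_cast' 1 b h
  rw [Nat.cast_one] at this
  exact this

lemma seg_eq_map (A : List Int) (a b : Nat) (hb : b ≤ A.length) :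
    seg A a b = (List.range' a (b - a)).map (gv A) := by
  apply List.ext_getElem
  · simp [seg]; omega
  · intro i h1 h2
    have hi : i < b - a := by simpa using h2
    have hia : a + i < A.length := by omega
    simp only [seg, List.getElem_take, List.getElem_drop, List.getElem_map, List.getElem_range',
      one_mul, gv]
    rw [List.getD_eq_getElem _ _ (by omega)]

lemma seg_snoc (A : List Int) (a b : Nat) (hab : a ≤ b) (hb : b < A.length) :
    seg A a (b + 1) = seg A a b ++ [gv A b] := by
  rw [seg_eq_map A a (b + 1) (by omega), seg_eq_map A a b (by omega)]
  rw [show b + 1 - a = (b - a) + 1 by omega, List.range'_concat, List.map_append,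
    show a + 1 * (b - a) = b by omega]
  simp

lemma seg_cons (A : List Int) (a b : Nat) (hab : a < b) (hb : b ≤ A.length) :
    seg A a b = gv A a :: seg A (a + 1) b := by
  rw [seg_eq_map A a b hb, seg_eq_map A (a + 1) b hb]
  rw [show b - a = (b - (a + 1)) + 1 by omega, List.range'_succ]
  simp

lemma seg_self (A : List Int) (a : Nat) : seg A a a = [] := by
  simp [seg]

lemma foldl_pyRange_seg (A : List Int) (st : Int × Int → Int → Int × Int) (a b : Nat)
    (hb : b ≤ A.length) (s0 : Int × Int) :
    (PySem.List.pyRange (a : Int) (b : Int)).foldl (fun s k => st s (PySem.List.pyGetD A k 0)) s0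
      = (seg A a b).foldl st s0 := by
  by_cases h : a ≤ b
  · rw [pyRange_cast' a b h, seg_eq_map A a b hb]
    simp only [List.foldl_map]
    apply PySem.List.foldl_congr_mem
    intro acc x _
    rw [PySem.List.pyGetD_natCast]
    rfl
  · rw [pyRange_nil (by omega), show seg A a b = [] from by simp [seg, show b - a = 0 by omega]]
    rfl

lemma foldl_max_hoist (f : Nat → Int) : ∀ (l : List Nat) (s a : Int),
    l.foldl (fun b y => max b (f y)) (max s a) = max s (l.foldl (fun b y => max b (f y)) a)
  | [], _, _ => rfl
  | x :: t, s, a => by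
    simp only [List.foldl_cons]
    rw [max_assoc]
    exact foldl_max_hoist f t s (max a (f x))

lemma foldl_max_add (c : Int) (f : Nat → Int) : ∀ (l : List Nat) (a : Int),
    l.foldl (fun b y => max b (c + f y)) (c + a) = c + l.foldl (fun b y => max b (f y)) a
  | [], _ => rfl
  | x :: t, a => by
    simp only [List.foldl_cons]
    rw [max_add_add_left]
    exact foldl_max_add c f t (max a (f x))

lemma gateUp_self (A : List Int) (c : Int) (z : Nat) : gateUp (c, gv A z) (gv A z) = (c, gv A z) := by
  simp [gateUp]

lemma gateDn_self (A : List Int) (c : Int) (z : Nat) : gateDn (c, gv A z) (gv A z) = (c, gv A z) := by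
  simp [gateDn]

lemma upFrom_eq (A : List Int) (z : Nat) (hz : z < A.length) :
    upFrom A (z : Int) = c3v A z := by
  unfold upFrom c3v cUp
  rw [show (z : Int) + 1 = ((z + 1 : Nat) : Int) by push_cast; ring]
  rw [foldl_pyRange_seg A gateUp (z + 1) A.length le_rfl]
  rw [PySem.List.pyGetD_natCast]
  rw [seg_cons A z A.length hz le_rfl]
  simp only [List.foldl_cons]
  rw [show A.getD z 0 = gv A z from rfl, gateUp_self]

lemma count3_read (A : List Int) (k : Nat) (hk : k < A.length) :
    PySem.List.pyGetD ((PySem.List.pyRange 0 (A.length : Int)).map (fun z => upFrom A z)) (k : Int) 0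
      = c3v A k := by
  rw [PySem.List.pyGetD_map_pyRange (fun z => upFrom A z) A.length k 0 hk]
  exact upFrom_eq A k hk

lemma cDn_self_succ (A : List Int) (j : Nat) (hj : j < A.length) : cDn A j (j + 1) = 0 := by
  unfold cDn
  rw [seg_cons A j (j + 1) (by omega) (by omega), seg_self]
  simp only [List.foldl_cons, List.foldl_nil]
  rw [gateDn_self]

lemma tailLoop (A : List Int) (C : List Int) (j : Nat)
    (hC : ∀ k : Nat, k < A.length → PySem.List.pyGetD C (k : Int) 0 = c3v A k) :
    ∀ (len z0 : Nat) (best : Int) (st : Int × Int),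
    j ≤ z0 → z0 + len + 1 ≤ A.length →
    st = (seg A j z0).foldl gateDn (0, gv A j) →
    ((List.range' z0 len).foldl (fun (s : Int × Int × Int) (z : Nat) =>
        (max s.1 ((gateDn s.2 (PySem.List.pyGetD A (z : Int) 0)).1
                   + PySem.List.pyGetD C ((z : Int) + 1) 0),
         gateDn s.2 (PySem.List.pyGetD A (z : Int) 0))) (best, st)).1
      = (List.range' z0 len).foldl (fun b z => max b (fz A j (z + 1))) best
  | 0, _, _, _, _, _, _ => rfl
  | (len+1), z0, best, st, hjz, hlen, hst => by
    rw [List.range'_succ]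
    simp only [List.foldl_cons]
    have hz0 : z0 < A.length := by omega
    rw [PySem.List.pyGetD_natCast A z0 0, show A.getD z0 0 = gv A z0 from rfl]
    have e2 : gateDn st (gv A z0) = (seg A j (z0 + 1)).foldl gateDn (0, gv A j) := by
      rw [seg_snoc A j z0 hjz hz0, List.foldl_append, ← hst]
      rfl
    rw [show (z0 : Int) + 1 = ((z0 + 1 : Nat) : Int) by push_cast; ring]
    rw [hC (z0 + 1) (by omega), e2]
    rw [show ((seg A j (z0 + 1)).foldl gateDn (0, gv A j)).1 + c3v A (z0 + 1) = fz A j (z0 + 1)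
        from rfl]
    exact tailLoop A C j hC len (z0 + 1) (max best (fz A j (z0 + 1))) _
      (by omega) (by omega) rfl

lemma bestTail_eq (A : List Int) (j : Nat) (hj1 : 1 ≤ j) (hj : j + 2 ≤ A.length) :
    bestTail A ((PySem.List.pyRange 0 (A.length : Int)).map (fun z => upFrom A z)) (j : Int)
      = M2 A j := by
  simp only [bestTail]
  rw [show (j : Int) + 1 = ((j + 1 : Nat) : Int) by push_cast; ring]
  rw [show ((A.length : Int) - 1) = ((A.length - 1 : Nat) : Int) by omega]
  rw [pyRange_cast' (j + 1) (A.length - 1) (by omega)]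
  simp only [List.foldl_map]
  rw [count3_read A (j + 1) (by omega)]
  rw [PySem.List.pyGetD_natCast A j 0, show A.getD j 0 = gv A j from rfl]
  have hinv : ((0 : Int), gv A j) = (seg A j (j + 1)).foldl gateDn (0, gv A j) := by
    rw [seg_cons A j (j + 1) (by omega) (by omega), seg_self]
    simp only [List.foldl_cons, List.foldl_nil]
    rw [gateDn_self]
  have hT := tailLoop A ((PySem.List.pyRange 0 (A.length : Int)).map (fun z => upFrom A z)) j
    (fun k hk => count3_read A k hk) (A.length - 1 - (j + 1)) (j + 1) (c3v A (j + 1))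
    ((0 : Int), gv A j) (by omega) (by omega) hinv
  rw [hT]
  unfold M2
  rw [show j + 2 = 1 + (j + 1) by omega, ← List.map_add_range' (j + 1) (A.length - 2 - j) 1,
    List.foldl_map]
  rw [show A.length - 1 - (j + 1) = A.length - 2 - j by omega]
  have hfz : fz A j (j + 1) = c3v A (j + 1) := by
    unfold fz
    rw [cDn_self_succ A j (by omega)]
    ring
  rw [hfz]
  apply PySem.List.foldl_congr_mem
  intro acc x _
  rw [Nat.add_comm 1 x]

lemma best2_read (A : List Int) (j : Nat) (hj1 : 1 ≤ j) (hj : j + 2 ≤ A.length) :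
    PySem.List.pyGetD
      ((PySem.List.pyRange 1 ((A.length : Int) - 1)).map (fun j' =>
        bestTail A ((PySem.List.pyRange 0 (A.length : Int)).map (fun z => upFrom A z)) j'))
      ((j : Int) - 1) 0 = M2 A j := by
  rw [show ((A.length : Int) - 1) = ((A.length - 1 : Nat) : Int) by omega]
  rw [pyRange_one_cast (A.length - 1) (by omega), List.map_map]
  rw [show ((j : Int) - 1) = ((j - 1 : Nat) : Int) by omega, PySem.List.pyGetD_natCast]
  rw [List.getD_eq_getElem _ _ (by simp; omega)]
  simp only [List.getElem_map, List.getElem_range', Function.comp_apply]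
  rw [show 1 + 1 * (j - 1) = j by omega]
  exact bestTail_eq A j hj1 hj

lemma zloop_eq (A : List Int) (j : Nat) (hj1 : 1 ≤ j) (hj : j + 2 ≤ A.length) (C s0 : Int) :
    (PySem.List.pyRange ((j : Int) + 1) (A.length : Int)).foldl (fun sol z =>
        max sol (C +
          ((PySem.List.pyRange (j : Int) z).foldl
            (fun s k => gateDn s (PySem.List.pyGetD A k 0)) (0, PySem.List.pyGetD A (j : Int) 0)).1 +
          ((PySem.List.pyRange z (A.length : Int)).foldl
            (fun s k => gateUp s (PySem.List.pyGetD A k 0)) (0, PySem.List.pyGetD A z 0)).1 + 3)) s0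
      = max s0 ((C + 3) + M2 A j) := by
  rw [show (j : Int) + 1 = ((j + 1 : Nat) : Int) by push_cast; ring]
  rw [pyRange_cast' (j + 1) A.length (by omega)]
  simp only [List.foldl_map]
  have htrans : (List.range' (j + 1) (A.length - (j + 1))).foldl
      (fun (b : Int) (z : Nat) => max b ((C + 3) + fz A j z)) s0 = max s0 ((C + 3) + M2 A j) := by
    rw [show A.length - (j + 1) = (A.length - 2 - j) + 1 by omega, List.range'_succ]
    simp only [List.foldl_cons]
    rw [show j + 1 + 1 = j + 2 by omega]
    rw [foldl_max_hoist (fun z => (C + 3) + fz A j z) (List.range' (j + 2) (A.length - 2 - j))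
      s0 ((C + 3) + fz A j (j + 1))]
    rw [foldl_max_add (C + 3) (fz A j)]
    rfl
  rw [← htrans]
  apply PySem.List.foldl_congr_mem
  intro acc z hz
  rw [List.mem_range'_1] at hz
  have hz2 : z ≤ A.length := by omega
  rw [PySem.List.pyGetD_natCast A j 0, PySem.List.pyGetD_natCast A z 0]
  rw [foldl_pyRange_seg A gateDn j z hz2, foldl_pyRange_seg A gateUp z A.length le_rfl]
  congr 1
  show C + cDn A j z + c3v A z + 3 = (C + 3) + fz A j z
  unfold fz
  ring

lemma mainLoop (A : List Int) (B2 : List Int) (i : Nat)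
    (hB : ∀ j : Nat, 1 ≤ j → j + 2 ≤ A.length → PySem.List.pyGetD B2 ((j : Int) - 1) 0 = M2 A j) :
    ∀ (len j0 : Nat) (sol : Int) (st : Int × Int),
    i < j0 → j0 + len ≤ A.length - 1 → 3 ≤ A.length →
    st = (seg A i (j0 - 1)).foldl gateUp (0, gv A i) →
    ((List.range' j0 len).foldl (fun (s : Int × Int × Int) (j : Nat) =>
        (max s.1 ((gateUp s.2 (PySem.List.pyGetD A ((j : Int) - 1) 0)).1
                   + PySem.List.pyGetD B2 ((j : Int) - 1) 0 + 3),
         gateUp s.2 (PySem.List.pyGetD A ((j : Int) - 1) 0))) (sol, st)).1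
      = (List.range' j0 len).foldl (fun sol j => max sol ((cUp A i j + 3) + M2 A j)) sol
  | 0, _, _, _, _, _, _, _ => rfl
  | (len+1), j0, sol, st, hij, hlen, hA3, hst => by
    rw [List.range'_succ]
    simp only [List.foldl_cons]
    have hj2 : j0 + 2 ≤ A.length := by omega
    have hBj := hB j0 (by omega) hj2
    rw [show ((j0 : Int) - 1) = ((j0 - 1 : Nat) : Int) by omega] at hBj ⊢
    rw [PySem.List.pyGetD_natCast A (j0 - 1) 0, show A.getD (j0 - 1) 0 = gv A (j0 - 1) from rfl]
    have e2 : gateUp st (gv A (j0 - 1)) = (seg A i j0).foldl gateUp (0, gv A i) := by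
      rw [show j0 = (j0 - 1) + 1 by omega, seg_snoc A i (j0 - 1) (by omega) (by omega),
        List.foldl_append, ← hst]
      rfl
    rw [hBj, e2]
    rw [show ((seg A i j0).foldl gateUp (0, gv A i)).1 = cUp A i j0 from rfl]
    rw [show cUp A i j0 + M2 A j0 + 3 = (cUp A i j0 + 3) + M2 A j0 by ring]
    exact mainLoop A B2 i hB len (j0 + 1) (max sol ((cUp A i j0 + 3) + M2 A j0)) _
      (by omega) (by omega) hA3 (by rw [show j0 + 1 - 1 = j0 by omega])

lemma jloop_eq (A : List Int) (i : Nat) (hi : i + 3 ≤ A.length) (s0 : Int) :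
    ((PySem.List.pyRange ((i : Int) + 1) ((A.length : Int) - 1)).foldl
        (fun (s : Int × Int × Int) j =>
          (max s.1 ((gateUp s.2 (PySem.List.pyGetD A (j - 1) 0)).1 + PySem.List.pyGetD
            ((PySem.List.pyRange 1 ((A.length : Int) - 1)).map (fun j' =>
              bestTail A ((PySem.List.pyRange 0 (A.length : Int)).map (fun z => upFrom A z)) j'))
            (j - 1) 0 + 3),
           gateUp s.2 (PySem.List.pyGetD A (j - 1) 0)))
        (s0, 0, PySem.List.pyGetD A (i : Int) 0)).1
      = (PySem.List.pyRange ((i : Int) + 1) ((A.length : Int) - 1)).foldl (fun sol j =>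
          (PySem.List.pyRange (j + 1) (A.length : Int)).foldl (fun sol z =>
            max sol (((PySem.List.pyRange (i : Int) j).foldl
                (fun s k => gateUp s (PySem.List.pyGetD A k 0)) (0, PySem.List.pyGetD A (i : Int) 0)).1 +
              ((PySem.List.pyRange j z).foldl
                (fun s k => gateDn s (PySem.List.pyGetD A k 0)) (0, PySem.List.pyGetD A j 0)).1 +
              ((PySem.List.pyRange z (A.length : Int)).foldl
                (fun s k => gateUp s (PySem.List.pyGetD A k 0)) (0, PySem.List.pyGetD A z 0)).1 + 3)) sol) s0 := by
  rw [show (i : Int) + 1 = ((i + 1 : Nat) : Int) by push_cast; ring]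
  rw [show ((A.length : Int) - 1) = ((A.length - 1 : Nat) : Int) by omega]
  rw [pyRange_cast' (i + 1) (A.length - 1) (by omega)]
  simp only [List.foldl_map]
  have hmain := mainLoop A
    ((PySem.List.pyRange 1 ((A.length : Int) - 1)).map (fun j' =>
      bestTail A ((PySem.List.pyRange 0 (A.length : Int)).map (fun z => upFrom A z)) j')) i
    (fun j hj1 hj2 => best2_read A j hj1 hj2)
    (A.length - 1 - (i + 1)) (i + 1) s0 (0, PySem.List.pyGetD A (i : Int) 0)
    (by omega) (by omega) (by omega) ?hst
  case hst =>
    rw [show i + 1 - 1 = i by omega, seg_self]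
    simp only [List.foldl_nil]
    rw [PySem.List.pyGetD_natCast A i 0]
    rfl
  rw [show ((A.length : Int) - 1) = ((A.length - 1 : Nat) : Int) by omega] at hmain
  rw [hmain]
  apply PySem.List.foldl_congr_mem
  intro acc j hj
  rw [List.mem_range'_1] at hj
  have hj1 : 1 ≤ j := by omega
  have hj2 : j + 2 ≤ A.length := by omega
  have hz := zloop_eq A j hj1 hj2
    (((PySem.List.pyRange ((i : Nat) : Int) ((j : Nat) : Int)).foldl
      (fun s k => gateUp s (PySem.List.pyGetD A k 0)) (0, PySem.List.pyGetD A ((i : Nat) : Int) 0)).1) acc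
  rw [hz]
  rw [foldl_pyRange_seg A gateUp i j (by omega)]
  rw [PySem.List.pyGetD_natCast A i 0, show A.getD i 0 = gv A i from rfl]
  rw [show ((seg A i j).foldl gateUp (0, gv A i)).1 = cUp A i j from rfl]

lemma main_eq (A : List Int) : solution A = solution_alt A := by
  by_cases h : (A.length : Int) ≤ 3
  · simp only [solution, solution_alt, if_pos h]
  · simp only [solution, solution_alt, if_neg h]
    apply PySem.List.foldl_congr_mem
    intro acc x hx
    rw [PySem.List.mem_pyRange_one] at hx
    obtain ⟨hx0, hx1⟩ := hx
    obtain ⟨i, rfl⟩ : ∃ i : Nat, (i : Int) = x := ⟨x.toNat, Int.toNat_of_nonneg hx0⟩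
    have hi : i + 3 ≤ A.length := by omega
    exact (jloop_eq A i hi acc).symm

-- ===== VERDICT (by name: the statement is the Claim_ definition above) =====
theorem solution_spec : Claim_equal_solution := by
  intro A _
  show solution A = solution_alt A
  exact main_eq A
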